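-- pv_equiv track=rewrite | github.com/srwei/Personal | CS Class Relevant Projects/srwei-cs25020-spr-18/PSET1/pset1.py | ordered_anagrams_by_size
-- ===== SOURCE A (Python) =====
-- def ordered_anagrams_by_size(hash_table):
-- 	sorted_anagrams = {}
-- 	for key in hash_table:
-- 		if len(hash_table[key]) > 1:
-- 			size = len(hash_table[key])
-- 			if size in sorted_anagrams:
-- 				sorted_anagrams[size].append(hash_table[key])
-- 			else:
-- 				sorted_anagrams[size] = [hash_table[key]]
-- 	sorted_anagrams = dict(sorted(sorted_anagrams.items()))
-- 	return sorted_anagrams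
-- ===== SOURCE B (Python) =====
-- def ordered_anagrams_by_size(hash_table):
--     vals = [v for v in hash_table.values() if len(v) > 1]
--     sizes = sorted({len(v) for v in vals})
--     return {s: [v for v in vals if len(v) == s] for s in sizes}
-- ===== Notes on version B (the rewrite author's own statement) =====
-- stated objective: simpler
-- what changed: Replaces the incremental size-bucket dict plus a final item sort with: filter values once, sort the distinct sizes, and build each group by a per-size filter over the value list.
import Mathlib
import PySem

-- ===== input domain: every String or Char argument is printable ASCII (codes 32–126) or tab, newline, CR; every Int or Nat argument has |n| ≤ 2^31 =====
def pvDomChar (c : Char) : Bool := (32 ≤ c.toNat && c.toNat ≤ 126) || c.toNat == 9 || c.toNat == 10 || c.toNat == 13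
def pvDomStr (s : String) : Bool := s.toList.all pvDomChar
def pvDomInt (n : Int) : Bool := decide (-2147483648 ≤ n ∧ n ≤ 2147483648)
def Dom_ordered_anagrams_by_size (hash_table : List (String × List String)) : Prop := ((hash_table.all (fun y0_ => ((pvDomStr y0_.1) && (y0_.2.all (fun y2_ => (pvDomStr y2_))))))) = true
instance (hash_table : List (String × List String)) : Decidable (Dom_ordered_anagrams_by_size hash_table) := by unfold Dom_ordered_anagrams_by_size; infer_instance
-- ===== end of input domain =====

-- B replaces A's incremental size-bucket dict + final item sort by a sorted-distinct-sizes pass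
-- with one filter per size (objective: simpler). Return-value equivalence only; neither mutates.

-- ===== PORT A =====
def ordered_anagrams_by_size (hash_table : List (String × List String)) : List (Int × List (List String)) :=
  let d0 : PySem.Dict String (List String) := PySem.Dict.mk hash_table
  let sa : PySem.Dict Int (List (List String)) :=
    d0.keys.foldl (fun sa key =>
      let v := d0.getD key []                      -- hash_table[key]; key comes from the dict itself, so present — exact
      if v.length > 1 then
        let size : Int := v.length
        if sa.contains size then sa.modify size [] (fun l => l ++ [v])   -- sorted_anagrams[size].append(...)
        else sa.insert size [v]
      else sa) PySem.Dict.empty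
  -- dict(sorted(sorted_anagrams.items())): keys are distinct ints, so Python's tuple
  -- comparison never reaches the second component — sorting by the key is exact here
  PySem.List.sorted sa.items (fun p => p.1) false

-- ===== PORT B =====
def ordered_anagrams_by_size_alt (hash_table : List (String × List String)) : List (Int × List (List String)) :=
  let vals := (PySem.Dict.mk hash_table).values.filter (fun v => decide (v.length > 1))
  let sizes := PySem.List.sorted (PySem.Set.ofList (vals.map (fun v => (v.length : Int)))) (fun x => x) false
  sizes.map (fun s => (s, vals.filter (fun v => ((v.length : Int) == s))))

-- ===== PRECONDITION & SPEC =====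
-- Pre_ excludes association lists with duplicate keys: they do not represent any Python dict
-- (dict construction collapses duplicates), so behaviour there is representation-dependent.
def Pre_ordered_anagrams_by_size (hash_table : List (String × List String)) : Prop :=
  (hash_table.map Prod.fst).Nodup
instance (hash_table : List (String × List String)) : Decidable (Pre_ordered_anagrams_by_size hash_table) := by unfold Pre_ordered_anagrams_by_size; infer_instance
def pvWitness_ordered_anagrams_by_size : (List (String × List String)) :=
  [("ab", ["ab", "ba"]), ("c", ["c"]), ("def", ["def", "fed", "efd"])]
def Spec_ordered_anagrams_by_size (hash_table : List (String × List String)) (out : List (Int × List (List String))) : Prop := out = ordered_anagrams_by_size_alt hash_table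
instance (hash_table : List (String × List String)) (out : List (Int × List (List String))) : Decidable (Spec_ordered_anagrams_by_size hash_table out) := by unfold Spec_ordered_anagrams_by_size; infer_instance

-- ===== CLAIM (what is proved, stated in full; the proofs are below) =====
def Claim_equal_ordered_anagrams_by_size : Prop := ∀ (hash_table : List (String × List String)), Dom_ordered_anagrams_by_size hash_table → Pre_ordered_anagrams_by_size hash_table → Spec_ordered_anagrams_by_size hash_table (ordered_anagrams_by_size hash_table)

-- ===== LEMMAS AND PROOFS =====
theorem anagrams_eq_of_nodup (ht : List (String × List String))
    (hnd : (ht.map Prod.fst).Nodup) :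
    ordered_anagrams_by_size ht = ordered_anagrams_by_size_alt ht := by
  have hkeys : (PySem.Dict.mk ht).keys = ht.map Prod.fst := by simp [PySem.Dict.keys]
  have hndk : (PySem.Dict.mk ht).keys.Nodup := by rw [hkeys]; exact hnd
  set F := ht.filter (fun p => decide (p.2.length > 1)) with hF
  set L := F.map (fun p => ((p.2.length : Int), p.2)) with hL
  set D := L.foldl (fun d q => d.modify q.1 [] (fun l => l ++ [q.2])) PySem.Dict.empty with hD
  set vals := ((PySem.Dict.mk ht).values.filter (fun v => decide (v.length > 1))) with hvals
  -- A's bucket-building loop equals the plain modify-fold over the filtered pairs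
  have hfold : (PySem.Dict.mk ht).keys.foldl (fun sa key =>
      let v := (PySem.Dict.mk ht).getD key []
      if v.length > 1 then
        let size : Int := v.length
        if sa.contains size then sa.modify size [] (fun l => l ++ [v])
        else sa.insert size [v]
      else sa) PySem.Dict.empty = D := by
    rw [hkeys, List.foldl_map]
    rw [PySem.List.foldl_congr_mem (g := fun sa (p : String × List String) =>
      if p.2.length > 1 then sa.modify (p.2.length : Int) [] (fun l => l ++ [p.2]) else sa)]
    · rw [PySem.List.foldl_ite_eq_foldl_filter, hD, hL, List.foldl_map]
    · intro acc p hp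
      have hget : (PySem.Dict.mk ht).getD p.1 [] = p.2 :=
        PySem.Dict.getD_of_mem_items _ hp hndk []
      simp only [hget]
      by_cases h : acc.contains ((p.2.length : Int))
      · simp [h]
      · simp only [h, Bool.false_eq_true, if_false]
        split
        · rw [PySem.Dict.modify, PySem.Dict.getD_of_not_contains _ _ (by simpa using h)]
          simp
        · rfl
  have hvalsF : vals = F.map Prod.snd := by
    rw [hvals, hF]
    have hv : (PySem.Dict.mk ht).values = ht.map Prod.snd := by simp [PySem.Dict.values]
    rw [hv, List.filter_map]
    simp [Function.comp_def]
  have hsizes : vals.map (fun v => (v.length : Int)) = L.map Prod.fst := by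
    rw [hvalsF, hL]; simp [List.map_map]
  have hDkeys : D.keys = PySem.Set.ofList (L.map Prod.fst) := by
    rw [hD, PySem.Dict.keys_foldl_modify_key]
    simp [PySem.Dict.keys_empty, PySem.Set.update_nil_left]
  have hDnodup : D.keys.Nodup := by
    rw [hD]; exact PySem.Dict.nodup_keys_foldl_modify_key _ _ _ _ _ PySem.Dict.nodup_keys_empty
  -- each bucket of D is the per-size filter B computes
  have hgetD : ∀ c : Int, D.getD c [] = vals.filter (fun v => ((v.length : Int) == c)) := by
    intro c
    rw [hD, PySem.Dict.getD_foldl_modify_append, PySem.Dict.getD_empty]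
    rw [hL, List.filter_map, List.map_map, hvalsF, List.filter_map]
    simp [Function.comp_def]
  have hitems : D.items = D.keys.map (fun k => (k, D.getD k [])) :=
    PySem.Dict.items_eq_map_keys D hDnodup []
  have hA : ordered_anagrams_by_size ht = PySem.List.sorted ((PySem.Dict.mk ht).keys.foldl (fun sa key =>
      let v := (PySem.Dict.mk ht).getD key []
      if v.length > 1 then
        let size : Int := v.length
        if sa.contains size then sa.modify size [] (fun l => l ++ [v])
        else sa.insert size [v]
      else sa) PySem.Dict.empty).items (fun p => p.1) false := rfl
  have hB : ordered_anagrams_by_size_alt ht = (PySem.List.sorted (PySem.Set.ofList (vals.map (fun v => (v.length : Int)))) (fun x => x) false).map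
      (fun s => (s, vals.filter (fun v => ((v.length : Int) == s)))) := rfl
  rw [hA, hfold, hB, hsizes, ← hDkeys]
  -- B's result is the strictly key-increasing rearrangement of D.items, hence A's sort of it
  apply PySem.List.sorted_eq_of_perm_of_pairwise_lt
  · simp only [← hgetD]
    rw [hitems]
    exact List.Perm.map _ (PySem.List.sorted_perm _ _ _)
  · apply List.Pairwise.map (R := fun a b => a < b)
    · intro a b hab; simpa using hab
    · rw [hDkeys]
      exact PySem.List.sorted_ofList_pairwise_lt _

-- ===== VERDICT (by name: the statement is the Claim_ definition above) =====
theorem ordered_anagrams_by_size_spec : Claim_equal_ordered_anagrams_by_size := by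
  intro ht _ hpre
  unfold Spec_ordered_anagrams_by_size
  exact anagrams_eq_of_nodup ht hpre
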